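-- pv_equiv track=rewrite | github.com/lily-bjork/Sumerian-Akkadian-Name-Classifier | Ripper.py | getSignOrder
-- ===== SOURCE A (Python) =====
-- def getSignOrder(name, signs):
--     name = name.strip()
--     name = name.split('-')
--     pos = 1
--     attributes = ["0" for i in range(len(signs))]
--     for sign in name:
--         for i in range(len(signs)):
--             if (signs[i] == sign):
--                 if attributes[i] == "0":
--                     attributes[i] = str(pos)
--                 else:
--                     attributes[i] += str(pos)
--         pos+=1
--     return attributes
-- ===== SOURCE B (Python) =====
-- def getSignOrder(name, signs):
--     positions = {}
--     for pos, part in enumerate(name.strip().split('-'), 1):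
--         positions[part] = positions.get(part, "") + str(pos)
--     return [positions.get(sign, "0") for sign in signs]
-- ===== Notes on version B (the rewrite author's own statement) =====
-- stated objective: alternative
-- what changed: Replaces A's inner scan over all signs for every name part with a dict mapping each part to its accumulated position string, built in one pass over the parts, followed by a single lookup per sign.
import Mathlib
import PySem

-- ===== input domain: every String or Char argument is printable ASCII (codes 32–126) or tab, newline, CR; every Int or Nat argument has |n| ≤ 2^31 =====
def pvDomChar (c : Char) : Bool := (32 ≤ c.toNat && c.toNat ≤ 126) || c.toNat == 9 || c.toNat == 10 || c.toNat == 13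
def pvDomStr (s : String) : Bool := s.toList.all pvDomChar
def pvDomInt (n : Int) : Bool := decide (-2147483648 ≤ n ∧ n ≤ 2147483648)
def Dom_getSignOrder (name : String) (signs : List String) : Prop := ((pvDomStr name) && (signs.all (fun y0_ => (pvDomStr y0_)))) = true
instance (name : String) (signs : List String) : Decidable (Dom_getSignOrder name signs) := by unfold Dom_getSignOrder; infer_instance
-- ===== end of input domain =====

-- B replaces A's per-part scan over all signs by a dict from name part to its accumulated
-- position string, built in one pass over the parts, with one lookup per sign at the end.

-- ===== PORT A =====
def getSignOrder (name : String) (signs : List String) : List String :=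
  let name1 := PySem.Str.strip name
  let parts := (PySem.Str.split? name1 "-").getD []
  let attributes := (PySem.List.pyRange 0 (PySem.List.len signs) 1).map (fun _ => "0")
  (parts.foldl (fun (st : List String × Int) sign =>
      ((PySem.List.pyRange 0 (PySem.List.len signs) 1).foldl (fun attrs i =>
        if PySem.List.pyGetD signs i "" == sign then
          (if PySem.List.pyGetD attrs i "" == "0" then
            PySem.List.pySetD attrs i (PySem.Int.toStr st.2)
          else
            PySem.List.pySetD attrs i (PySem.List.pyGetD attrs i "" ++ PySem.Int.toStr st.2))
        else attrs) st.1,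
       st.2 + 1)) (attributes, 1)).1

-- ===== PORT B =====
def getSignOrder_alt (name : String) (signs : List String) : List String :=
  let parts := (PySem.Str.split? (PySem.Str.strip name) "-").getD []
  let positions := (PySem.List.enumerate parts 1).foldl
      (fun (d : PySem.Dict String String) p =>
        d.insert p.2 (d.getD p.2 "" ++ PySem.Int.toStr p.1)) PySem.Dict.empty
  signs.map (fun sign => positions.getD sign "0")

-- ===== PRECONDITION & SPEC =====
def Spec_getSignOrder (name : String) (signs : List String) (out : List String) : Prop := out = getSignOrder_alt name signs
instance (name : String) (signs : List String) (out : List String) : Decidable (Spec_getSignOrder name signs out) := by unfold Spec_getSignOrder; infer_instance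

-- ===== CLAIM (what is proved, stated in full; the proofs are below) =====
def Claim_equal_getSignOrder : Prop := ∀ (name : String) (signs : List String), Dom_getSignOrder name signs → Spec_getSignOrder name signs (getSignOrder name signs)

-- ===== LEMMAS AND PROOFS =====
theorem td_len : ∀ (f n : Nat) (l : List Char), l.length + 1 ≤ (Nat.toDigitsCore 10 (f+1) n l).length := by
  intro f
  induction f with
  | zero => intro n l; rw [Nat.toDigitsCore]; split <;> simp [Nat.toDigitsCore]
  | succ f ih =>
    intro n l
    rw [Nat.toDigitsCore]
    split
    · simp
    · have := ih (n/10) ((n % 10).digitChar :: l)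
      simp at this ⊢
      omega

theorem toStr_ne_empty (p : Int) (hp : 1 ≤ p) : PySem.Int.toStr p ≠ "" := by
  intro h
  have h2 := congrArg String.toList h
  rw [PySem.Int.toList_toStr] at h2
  simp [PySem.Int.toChars, show ¬ p < 0 by omega] at h2
  have := td_len p.toNat p.toNat []
  rw [show p.toNat + 1 = p.toNat + 1 from rfl] at this
  unfold Nat.toDigits at h2
  rw [h2] at this
  simp at this

theorem toStr_ne_zero (p : Int) (hp : 1 ≤ p) : PySem.Int.toStr p ≠ "0" := by
  intro h
  have h2 := congrArg String.toList h
  rw [PySem.Int.toList_toStr] at h2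
  simp [PySem.Int.toChars, show ¬ p < 0 by omega] at h2
  -- h2 : Nat.toDigits 10 p.toNat = ['0']
  unfold Nat.toDigits at h2
  rcases Nat.lt_or_ge p.toNat 10 with hlt | hge
  · have h1 : 1 ≤ p.toNat := by omega
    interval_cases h : p.toNat <;> simp_all [Nat.toDigitsCore, Nat.digitChar]
  · -- fuel = p.toNat ≥ 10, so ≥ 1 step then recursive call with nonzero n/10
    obtain ⟨f, hf⟩ : ∃ f, p.toNat = f + 1 := ⟨p.toNat - 1, by omega⟩
    rw [hf] at h2
    rw [Nat.toDigitsCore] at h2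
    rw [if_neg (by omega : ¬ ((f+1) / 10 = 0))] at h2
    obtain ⟨g, hg⟩ : ∃ g, f = g + 1 := ⟨f - 1, by omega⟩
    rw [hg] at h2
    have := td_len (g+1) ((g+1+1)/10) (((g+1+1) % 10).digitChar :: [])
    rw [h2] at this
    simp at this

theorem str_toList_ne_nil (a : String) (h : a ≠ "") : a.toList ≠ [] := by
  intro hl
  exact h (by
    have := congrArg String.ofList hl
    simpa using this)

theorem append_ne (a b : String) (ha : a ≠ "") (hb : b ≠ "") : a ++ b ≠ "0" ∧ a ++ b ≠ "" := by
  have hla := str_toList_ne_nil a ha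
  have hlb := str_toList_ne_nil b hb
  have hlen : 2 ≤ (a ++ b).toList.length := by
    rw [String.toList_append]
    rw [List.length_append]
    have h1 : 1 ≤ a.toList.length := List.length_pos_iff.mpr hla
    have h2 : 1 ≤ b.toList.length := List.length_pos_iff.mpr hlb
    omega
  constructor <;> intro h <;> rw [h] at hlen <;> simp at hlen

def pvUpd (pos : Int) (x : String) : String :=
  if x == "0" then PySem.Int.toStr pos else x ++ PySem.Int.toStr pos

def pvInner (signs : List String) (sign : String) (pos : Int) (attrs : List String) (r : List Int) : List String :=
  r.foldl (fun attrs i =>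
    if PySem.List.pyGetD signs i "" == sign then
      (if PySem.List.pyGetD attrs i "" == "0" then
        PySem.List.pySetD attrs i (PySem.Int.toStr pos)
      else
        PySem.List.pySetD attrs i (PySem.List.pyGetD attrs i "" ++ PySem.Int.toStr pos))
    else attrs) attrs

theorem inner_spec (signs : List String) (sign : String) (pos : Int)
    (n : Nat) (hn : n ≤ signs.length) (attrs : List String) (h : attrs.length = signs.length) :
    (pvInner signs sign pos attrs (PySem.List.pyRange 0 (n : Int) 1)).length = signs.length ∧
    ∀ j : Nat, (pvInner signs sign pos attrs (PySem.List.pyRange 0 (n : Int) 1))[j]? =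
      if j < n ∧ signs.getD j "" == sign then some (pvUpd pos (attrs.getD j "")) else attrs[j]? := by
  induction n with
  | zero =>
    rw [show ((0 : Nat) : Int) = 0 by rfl, PySem.List.pyRange_one_eq_nil (by simp)]
    simp [pvInner, h]
  | succ n ih =>
    have hcast : ((n + 1 : Nat) : Int) = (n : Int) + 1 := by push_cast; ring
    rw [hcast, PySem.List.pyRange_one_succ_right (by positivity)]
    unfold pvInner
    rw [List.foldl_append]
    rw [show ∀ l, List.foldl _ attrs l = pvInner signs sign pos attrs l from fun _ => rfl]
    obtain ⟨ihl, ihg⟩ := ih (by omega)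
    set R := pvInner signs sign pos attrs (PySem.List.pyRange 0 (n : Int) 1) with hR
    have hRn : R[n]? = some (attrs.getD n "") := by
      rw [ihg n, if_neg (by omega), List.getD_eq_getElem?_getD,
          List.getElem?_eq_getElem (by omega)]
      simp
    have hgetS : PySem.List.pyGetD signs ((n : Nat) : Int) "" = signs.getD n "" := by
      simp
    have hgetRn : PySem.List.pyGetD R ((n : Nat) : Int) "" = attrs.getD n "" := by
      rw [PySem.List.pyGetD_natCast, List.getD_eq_getElem?_getD, hRn]
      simp
    simp only [List.foldl_cons, List.foldl_nil, hgetS, hgetRn]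
    by_cases hs : signs.getD n "" == sign
    · rw [if_pos hs]
      have hset : ∀ v, PySem.List.pySetD R ((n : Nat) : Int) v = R.set n v :=
        fun v => PySem.List.pySetD_natCast R n v
      constructor
      · split <;> simp [hset, ihl]
      · intro j
        split <;>
        · rename_i h0
          rw [hset, List.getElem?_set]
          by_cases hjn : j = n
          · subst hjn
            rw [if_pos rfl, if_pos (by rw [ihl]; omega), if_pos ⟨by omega, hs⟩]
            simp only [pvUpd, List.getD_eq_getElem?_getD] at h0 ⊢
            simp [h0]
          · rw [if_neg (fun hh => hjn hh.symm), ihg j]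
            by_cases hc : signs.getD j "" == sign <;>
              by_cases hj2 : j < n <;>
                simp [hj2, show (j < n+1) ↔ (j < n ∨ j = n) by omega, hjn]
    · rw [if_neg hs]
      refine ⟨ihl, fun j => ?_⟩
      rw [ihg j]
      by_cases hjn : j = n
      · subst hjn
        simp only [List.getD_eq_getElem?_getD] at hs
        simp [hs, List.getD_eq_getElem?_getD]
      · by_cases hc : signs.getD j "" == sign <;>
          by_cases hj2 : j < n <;>
            simp [hj2, show (j < n+1) ↔ (j < n ∨ j = n) by omega, hjn]

def pvGood (d : PySem.Dict String String) : Prop :=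
  ∀ k v, d.get? k = some v → v ≠ "0" ∧ v ≠ ""

theorem outer (signs : List String) (parts : List String) :
    ∀ (attrs : List String) (d : PySem.Dict String String) (pos : Int),
    1 ≤ pos →
    attrs.length = signs.length →
    pvGood d →
    (∀ j : Nat, attrs[j]? = (signs[j]?).map (fun s => d.getD s "0")) →
    (parts.foldl (fun (st : List String × Int) sign =>
        (pvInner signs sign st.2 st.1 (PySem.List.pyRange 0 (PySem.List.len signs) 1), st.2 + 1)) (attrs, pos)).1
      = signs.map (fun s => ((PySem.List.enumerate parts pos).foldl
          (fun (d : PySem.Dict String String) p => d.insert p.2 (d.getD p.2 "" ++ PySem.Int.toStr p.1)) d).getD s "0") := by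
  induction parts with
  | nil =>
    intro attrs d pos _ _ _ hptw
    simp only [List.foldl_nil, PySem.List.enumerate_nil]
    apply List.ext_getElem?
    intro j
    rw [hptw j, List.getElem?_map]
  | cons part parts ih =>
    intro attrs d pos hpos hlen hgood hptw
    rw [PySem.List.enumerate_cons]
    simp only [List.foldl_cons]
    have hrange : PySem.List.pyRange 0 (PySem.List.len signs) 1
        = PySem.List.pyRange 0 ((signs.length : Nat) : Int) 1 := by
      simp [PySem.List.len_eq]
    set A' := pvInner signs part pos attrs (PySem.List.pyRange 0 (PySem.List.len signs) 1) with hA'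
    set d' := d.insert part (d.getD part "" ++ PySem.Int.toStr pos) with hd'
    obtain ⟨hL, hG⟩ := by
      rw [hrange] at hA'
      exact hA' ▸ inner_spec signs part pos signs.length le_rfl attrs hlen
    have hgood' : pvGood d' := by
      intro k v hkv
      rw [hd', PySem.Dict.get?_insert d part k (d.getD part "" ++ PySem.Int.toStr pos)] at hkv
      by_cases hk : k = part
      · rw [if_pos hk] at hkv
        cases hkv
        rcases hdp : d.get? part with _ | v0
        · rw [PySem.Dict.getD_eq_get?_getD, hdp]
          simpa using ⟨toStr_ne_zero pos hpos, toStr_ne_empty pos hpos⟩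
        · rw [PySem.Dict.getD_eq_get?_getD, hdp]
          exact append_ne v0 _ (hgood part v0 hdp).2 (toStr_ne_empty pos hpos)
      · rw [if_neg hk] at hkv
        exact hgood k v hkv
    have hptw' : ∀ j : Nat, A'[j]? = (signs[j]?).map (fun s => d'.getD s "0") := by
      intro j
      rw [hG j]
      by_cases hj : j < signs.length
      · rw [List.getElem?_eq_getElem hj, Option.map_some]
        have hsg : signs.getD j "" = signs[j] := by
          rw [List.getD_eq_getElem?_getD, List.getElem?_eq_getElem hj]; rfl
        have hag : attrs.getD j "" = d.getD signs[j] "0" := by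
          rw [List.getD_eq_getElem?_getD, hptw j, List.getElem?_eq_getElem hj]; rfl
        by_cases hsp : signs[j] = part
        · rw [if_pos ⟨hj, by simp only [beq_iff_eq]; rw [hsg, hsp]⟩]
          congr 1
          rw [hag, hsp, hd']
          rw [show (d.insert part (d.getD part "" ++ PySem.Int.toStr pos)).getD part "0"
                = d.getD part "" ++ PySem.Int.toStr pos by
            rw [PySem.Dict.getD_eq_get?_getD,
                PySem.Dict.get?_insert d part part (d.getD part "" ++ PySem.Int.toStr pos), if_pos rfl]; rfl]
          rcases hdp : d.get? part with _ | v0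
          · rw [PySem.Dict.getD_eq_get?_getD, hdp, PySem.Dict.getD_eq_get?_getD, hdp]
            simp [pvUpd]
          · rw [PySem.Dict.getD_eq_get?_getD, hdp, PySem.Dict.getD_eq_get?_getD, hdp]
            simp only [Option.getD_some]
            simp [pvUpd, (hgood part v0 hdp).1]
        · rw [if_neg (by rintro ⟨-, hh⟩; rw [hsg] at hh; exact hsp (by simpa using hh))]
          rw [hptw j, List.getElem?_eq_getElem hj, Option.map_some]
          congr 1
          rw [hd', PySem.Dict.getD_eq_get?_getD, PySem.Dict.getD_eq_get?_getD,
              PySem.Dict.get?_insert d part signs[j] (d.getD part "" ++ PySem.Int.toStr pos),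
              if_neg hsp]
      · rw [if_neg (by omega), hptw j, List.getElem?_eq_none (by omega), Option.map_none,
            Option.map_none]
    exact ih A' d' (pos + 1) (by omega) hL hgood' hptw'

theorem getSignOrder_eq_alt (name : String) (signs : List String) :
    getSignOrder name signs = getSignOrder_alt name signs := by
  show (((PySem.Str.split? (PySem.Str.strip name) "-").getD []).foldl _
      ((PySem.List.pyRange 0 (PySem.List.len signs) 1).map (fun _ => "0"), 1)).1 = _
  refine (outer signs ((PySem.Str.split? (PySem.Str.strip name) "-").getD [])
      ((PySem.List.pyRange 0 (PySem.List.len signs) 1).map (fun _ => "0"))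
      PySem.Dict.empty 1 le_rfl ?_ ?_ ?_)
  · simp [PySem.List.length_pyRange_one]
  · intro k v hkv
    simp [PySem.Dict.get?_empty] at hkv
  · intro j
    have hlr : (PySem.List.pyRange 0 (PySem.List.len signs) 1).length = signs.length := by
      simp [PySem.List.length_pyRange_one]
    rw [List.getElem?_map]
    by_cases hj : j < signs.length
    · rw [List.getElem?_eq_getElem (by omega : j < (PySem.List.pyRange 0 (PySem.List.len signs) 1).length),
          List.getElem?_eq_getElem hj]
      simp [PySem.Dict.getD_empty]
    · rw [List.getElem?_eq_none (by omega), List.getElem?_eq_none (by omega)]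
      rfl

-- ===== VERDICT (by name: the statement is the Claim_ definition above) =====
theorem getSignOrder_spec : Claim_equal_getSignOrder := by
  intro name signs _
  show _ = _
  exact getSignOrder_eq_alt name signs
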